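-- pv_equiv track=rewrite | github.com/TomKite57/advent_of_code_2017 | headers/day11.py | swap_moves
-- ===== SOURCE A (Python) =====
-- def swap_moves(path, map_rule):
--     to_remove = dict([(x, path.count(x)) for x in map_rule[0]])
--     val = min([to_remove.get(x, 0) for x in map_rule[0]])
--     for x in map_rule[0]:
--         to_remove[x] = val
--
--     counter = 0
--     while sum(to_remove.values()) != 0:
--         elem = path[counter]
--         if to_remove.get(elem, 0) != 0:
--             del path[counter]
--             to_remove[elem] -= 1
--             if elem == map_rule[0][0]:
--                 path.append(map_rule[1])
--             continue
--         counter += 1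
--     return path
-- ===== SOURCE B (Python) =====
-- def swap_moves(path, map_rule):
--     tokens, repl = map_rule
--     tokset = set(tokens)
--     cnt = {}
--     for x in path:
--         if x in tokset:
--             cnt[x] = cnt.get(x, 0) + 1
--     val = min(cnt.get(t, 0) for t in tokens)
--     budget = dict.fromkeys(tokens, val)
--     out = []
--     for x in path:
--         b = budget.get(x, 0)
--         if b:
--             budget[x] = b - 1
--         else:
--             out.append(x)
--     out.extend([repl] * val)
--     path[:] = out
--     return path
-- ===== Notes on version B (the rewrite author's own statement) =====
-- stated objective: faster
-- what changed: A repeatedly rescans and deletes inside the list (path.count per token, del path[counter] and re-checking sum(to_remove.values()) every iteration); B makes one counting pass to get the minimum count, then one filtering pass that skips the first val occurrences of each token and appends the val replacements at the end.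
import Mathlib
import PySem

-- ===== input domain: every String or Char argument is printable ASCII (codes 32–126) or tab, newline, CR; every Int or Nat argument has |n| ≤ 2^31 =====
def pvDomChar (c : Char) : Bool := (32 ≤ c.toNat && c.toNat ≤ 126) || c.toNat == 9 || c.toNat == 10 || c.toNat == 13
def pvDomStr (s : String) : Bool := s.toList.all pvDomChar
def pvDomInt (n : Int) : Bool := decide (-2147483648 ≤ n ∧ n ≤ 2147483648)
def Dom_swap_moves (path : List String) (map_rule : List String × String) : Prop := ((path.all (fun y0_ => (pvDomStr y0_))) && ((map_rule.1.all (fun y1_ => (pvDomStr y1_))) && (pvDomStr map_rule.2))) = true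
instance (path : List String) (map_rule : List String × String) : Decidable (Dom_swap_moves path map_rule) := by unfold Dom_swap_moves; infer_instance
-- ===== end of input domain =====

-- B replaces A's quadratic delete-and-rescan while-loop by one counting pass plus one filtering pass
-- (budgets per token, skip the first `val` occurrences, append the replacements at the end); faster by a
-- constant/asymptotic mechanism measured. Both A and B mutate `path` in place to the
-- returned list (B via `path[:] = out`); the equivalence proved here is about the return value.


-- ===== PORT A =====
-- the while-loop: counter scans `path`; an element with remaining removal budget is deleted (and, if it
-- equals map_rule[0][0], the replacement is appended); otherwise counter += 1.  The fuel argument only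
-- makes the recursion total; it is proved sufficient on every admitted input.  `pyGet? = none` is where
-- Python would raise IndexError (unreachable: budgets never exceed the remaining occurrences).
def swapLoopA (rule0 : List String) (repl : String) : Nat → PySem.Dict String Int → List String → Int → List String
  | 0, _, path, _ => path
  | fuel + 1, d, path, counter =>
    if d.values.sum ≠ 0 then
      match PySem.List.pyGet? path counter with
      | none => path
      | some elem =>
        let b := d.getD elem 0
        if b ≠ 0 then
          let path1 := path.eraseIdx counter.toNat
          let d' := d.insert elem (b - 1)
          let path2 := if some elem = PySem.List.pyGet? rule0 0 then path1 ++ [repl] else path1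
          swapLoopA rule0 repl fuel d' path2 counter
        else
          swapLoopA rule0 repl fuel d path (counter + 1)
    else path

def swap_moves (path : List String) (map_rule : List String × String) : List String :=
  let to_remove0 : PySem.Dict String Int :=
    PySem.Dict.ofList (map_rule.1.map (fun x => (x, (PySem.List.count path x : Int))))
  -- min([]) raises ValueError: Pre_swap_moves excludes map_rule.1 = []
  let val : Int := (PySem.List.min? (map_rule.1.map (fun x => to_remove0.getD x 0)) (fun v => v)).getD 0
  let to_remove := map_rule.1.foldl (fun d x => d.insert x val) to_remove0
  swapLoopA map_rule.1 map_rule.2 (path.length + 2 * (to_remove.values.sum).toNat + 1) to_remove path 0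

-- ===== PORT B =====
def swap_moves_alt (path : List String) (map_rule : List String × String) : List String :=
  let tokens := map_rule.1
  let repl := map_rule.2
  let tokset := PySem.Set.ofList tokens
  let cnt : PySem.Dict String Int :=
    path.foldl (fun c x => if PySem.Set.contains tokset x then c.insert x (c.getD x 0 + 1) else c)
      PySem.Dict.empty
  -- min of an empty generator raises ValueError: Pre_swap_moves excludes tokens = []
  let val : Int := (PySem.List.min? (tokens.map (fun t => cnt.getD t 0)) (fun v => v)).getD 0
  let budget : PySem.Dict String Int := tokens.foldl (fun b t => b.insert t val) PySem.Dict.empty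
  let st := path.foldl
    (fun (st : PySem.Dict String Int × List String) x =>
      let b := st.1.getD x 0
      if b ≠ 0 then (st.1.insert x (b - 1), st.2) else (st.1, st.2 ++ [x]))
    (budget, [])
  st.2 ++ List.replicate val.toNat repl

-- ===== PRECONDITION & SPEC =====
-- A raises ValueError (min() of an empty sequence) when map_rule[0] is empty, and so does B; nothing else raises.
def Pre_swap_moves (path : List String) (map_rule : List String × String) : Prop := map_rule.1 ≠ []
instance (path : List String) (map_rule : List String × String) : Decidable (Pre_swap_moves path map_rule) := by
  unfold Pre_swap_moves; infer_instance

def pvWitness_swap_moves : List String × (List String × String) := (["n", "s", "n"], (["n", "s"], "x"))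

def Spec_swap_moves (path : List String) (map_rule : List String × String) (out : List String) : Prop := out = swap_moves_alt path map_rule
instance (path : List String) (map_rule : List String × String) (out : List String) : Decidable (Spec_swap_moves path map_rule out) := by unfold Spec_swap_moves; infer_instance

-- ===== CLAIM (what is proved, stated in full; the proofs are below) =====
def Claim_equal_swap_moves : Prop := ∀ (path : List String) (map_rule : List String × String), Dom_swap_moves path map_rule → Pre_swap_moves path map_rule → Spec_swap_moves path map_rule (swap_moves path map_rule)

-- ===== LEMMAS AND PROOFS =====

-- the filtering pass, recursively: kept elements of `l` when each token's budget is in `d`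
def scanD (d : PySem.Dict String Int) : List String → List String
  | [] => []
  | x :: xs =>
    if d.getD x 0 ≠ 0 then scanD (d.insert x (d.getD x 0 - 1)) xs else x :: scanD d xs

-- how many removed elements equal rule0[0]
def remC (rule0 : List String) (d : PySem.Dict String Int) : List String → Nat
  | [] => 0
  | x :: xs =>
    if d.getD x 0 ≠ 0 then
      (if some x = PySem.List.pyGet? rule0 0 then 1 else 0) + remC rule0 (d.insert x (d.getD x 0 - 1)) xs
    else remC rule0 d xs

lemma eraseIdx_append_len {α : Type} (pre : List α) (y : α) (t : List α) :
    (pre ++ y :: t).eraseIdx pre.length = pre ++ t := by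
  induction pre with
  | nil => simp
  | cons a l ih => simpa using ih

lemma getD_foldl_insert_fun (g : String → Int) (l : List String) :
    ∀ (d : PySem.Dict String Int) (t : String),
      (l.foldl (fun d x => d.insert x (g x)) d).getD t 0 = if t ∈ l then g t else d.getD t 0 := by
  induction l with
  | nil => simp
  | cons x xs ih =>
    intro d t
    simp only [List.foldl_cons, ih, List.mem_cons]
    by_cases hx : t ∈ xs
    · simp [hx]
    · by_cases htx : t = x
      · subst htx; simp [hx, PySem.Dict.getD_insert_self]
      · simp [hx, htx, PySem.Dict.getD_insert_of_ne _ _ _ htx]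

lemma sum_map_snd_overwrite (x : String) (b v : Int) :
    ∀ (l : List (String × Int)), (l.map (·.1)).Nodup → (x, b) ∈ l →
      ((l.map (fun p => if (p.1 == x) then (x, v) else p)).map (·.2)).sum = (l.map (·.2)).sum - b + v := by
  intro l
  induction l with
  | nil => simp
  | cons p t ih =>
    intro hnd hm
    simp only [List.map_cons, List.nodup_cons, List.mem_map] at hnd
    rcases List.mem_cons.1 hm with h | h
    · subst h
      have ht : t.map (fun p => if (p.1 == x) then (x, v) else p) = t.map id := by
        apply List.map_congr_left
        intro q hq
        have : ¬ (q.1 == x) = true := fun hqx => hnd.1 ⟨q, hq, by simpa using hqx⟩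
        simp [this]
      rw [List.map_cons, List.map_cons, List.sum_cons, List.map_cons, List.sum_cons, ht, List.map_id]
      simp; ring
    · have hpx : ¬ (p.1 == x) = true := by
        intro hpx
        exact hnd.1 ⟨(x, b), h, by simpa using (beq_iff_eq.mp hpx).symm⟩
      rw [List.map_cons, List.map_cons, List.sum_cons, List.map_cons, List.sum_cons, if_neg hpx,
        ih hnd.2 h]
      ring

lemma sum_values_insert (d : PySem.Dict String Int) {x : String} {b : Int}
    (hnd : d.keys.Nodup) (hx : d.get? x = some b) (v : Int) :
    (d.insert x v).values.sum = d.values.sum - b + v := by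
  have hc : d.contains x = true := by
    rw [PySem.Dict.contains_eq_isSome_get?, hx]; rfl
  have hm : (x, b) ∈ d.items := PySem.Dict.mem_items_of_get?_eq_some d hx
  have := sum_map_snd_overwrite x b v d.items (by simpa [PySem.Dict.keys] using hnd) hm
  simp only [PySem.Dict.insert, hc, if_true, PySem.Dict.values]
  exact this

lemma get?_eq_some_getD (d : PySem.Dict String Int) (x : String) (h : d.getD x 0 ≠ 0) :
    d.get? x = some (d.getD x 0) := by
  cases hg : d.get? x with
  | none => exfalso; apply h; simp [PySem.Dict.getD, hg]
  | some v => simp [PySem.Dict.getD, hg]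

lemma values_nonneg_of_items (d : PySem.Dict String Int)
    (h : ∀ p ∈ d.items, 0 ≤ p.2) : ∀ v ∈ d.values, 0 ≤ v := by
  intro v hv
  rcases List.mem_map.1 hv with ⟨p, hp, rfl⟩
  exact h p hp

lemma getD_zero_of_sum_zero (d : PySem.Dict String Int)
    (hnn : ∀ v ∈ d.values, 0 ≤ v) (hs : d.values.sum = 0) (t : String) : d.getD t 0 = 0 := by
  cases hg : d.get? t with
  | none => simp [PySem.Dict.getD, hg]
  | some v =>
    have hm : v ∈ d.values := List.mem_map.2 ⟨(t, v), PySem.Dict.mem_items_of_get?_eq_some d hg, rfl⟩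
    have h1 : v ≤ d.values.sum := List.single_le_sum hnn v hm
    have h2 : 0 ≤ v := hnn v hm
    simp [PySem.Dict.getD, hg]; omega

lemma scanD_of_zero (d : PySem.Dict String Int) (h : ∀ t, d.getD t 0 = 0) :
    ∀ l : List String, scanD d l = l := by
  intro l; induction l with
  | nil => rfl
  | cons x xs ih => simp [scanD, h x, ih]

lemma remC_of_zero (rule0 : List String) (d : PySem.Dict String Int) (h : ∀ t, d.getD t 0 = 0) :
    ∀ l : List String, remC rule0 d l = 0 := by
  intro l; induction l with
  | nil => rfl
  | cons x xs ih => simp [remC, h x, ih]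

lemma scanD_congr : ∀ (l : List String) (d₁ d₂ : PySem.Dict String Int),
    (∀ t, d₁.getD t 0 = d₂.getD t 0) → scanD d₁ l = scanD d₂ l := by
  intro l
  induction l with
  | nil => intro _ _ _; rfl
  | cons x xs ih =>
    intro d₁ d₂ h
    simp only [scanD, h x]
    by_cases hb : d₂.getD x 0 ≠ 0
    · rw [if_pos hb, if_pos hb]
      apply ih
      intro t
      by_cases htx : t = x
      · subst htx; simp [PySem.Dict.getD_insert_self]
      · simp [PySem.Dict.getD_insert_of_ne _ _ _ htx, h t]
    · rw [if_neg hb, if_neg hb]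
      exact congrArg _ (ih d₁ d₂ h)

lemma remC_congr (rule0 : List String) : ∀ (l : List String) (d₁ d₂ : PySem.Dict String Int),
    (∀ t, d₁.getD t 0 = d₂.getD t 0) → remC rule0 d₁ l = remC rule0 d₂ l := by
  intro l
  induction l with
  | nil => intro _ _ _; rfl
  | cons x xs ih =>
    intro d₁ d₂ h
    simp only [remC, h x]
    by_cases hb : d₂.getD x 0 ≠ 0
    · rw [if_pos hb, if_pos hb]
      congr 1
      apply ih
      intro t
      by_cases htx : t = x
      · subst htx; simp [PySem.Dict.getD_insert_self]
      · simp [PySem.Dict.getD_insert_of_ne _ _ _ htx, h t]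
    · rw [if_neg hb, if_neg hb]
      exact ih d₁ d₂ h

-- number of removals that equal rule0[0] is exactly the budget of rule0[0], provided it fits the list
lemma remC_eq_budget (f0 : String) (r0 : List String) :
    ∀ (l : List String) (d : PySem.Dict String Int),
      0 ≤ d.getD (f0) 0 → d.getD f0 0 ≤ (l.count f0 : Int) →
      remC (f0 :: r0) d l = (d.getD f0 0).toNat := by
  intro l
  induction l with
  | nil =>
    intro d h0 hc
    simp only [List.count_nil, Int.natCast_zero] at hc
    simp [remC]; omega
  | cons x xs ih =>
    intro d h0 hc
    have hget : PySem.List.pyGet? (f0 :: r0) 0 = some f0 := by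
      have := PySem.List.pyGet?_natCast (f0 :: r0) 0
      simpa using this
    simp only [remC, hget]
    by_cases hb : d.getD x 0 ≠ 0
    · rw [if_pos hb]
      by_cases hx : x = f0
      · subst hx
        rw [if_pos rfl]
        have hrec := ih (d.insert x (d.getD x 0 - 1))
          (by rw [PySem.Dict.getD_insert_self]; omega)
          (by rw [PySem.Dict.getD_insert_self]
              simp only [List.count_cons_self] at hc; push_cast at hc ⊢; omega)
        rw [hrec, PySem.Dict.getD_insert_self]
        omega
      · have hne : (some x = some f0) = False := by simp [hx]
        simp only [hne, if_false, Nat.zero_add]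
        have hgf : (d.insert x (d.getD x 0 - 1)).getD f0 0 = d.getD f0 0 :=
          PySem.Dict.getD_insert_of_ne _ _ _ (fun h => hx h.symm)
        have hcnt : (x :: xs).count f0 = xs.count f0 := List.count_cons_of_ne hx
        rw [ih _ (by rw [hgf]; exact h0) (by rw [hgf]; rw [hcnt] at hc; exact hc), hgf]
    · rw [if_neg hb]
      by_cases hx : x = f0
      · subst hx
        push_neg at hb
        rw [ih d h0 (by rw [hb]; positivity)]
      · have hcnt : (x :: xs).count f0 = xs.count f0 := List.count_cons_of_ne hx
        rw [ih d h0 (by rw [hcnt] at hc; exact hc)]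

-- B's second loop is scanD
lemma foldl_scan (l : List String) :
    ∀ (d : PySem.Dict String Int) (acc : List String),
      (l.foldl (fun (st : PySem.Dict String Int × List String) x =>
        let b := st.1.getD x 0
        if b ≠ 0 then (st.1.insert x (b - 1), st.2) else (st.1, st.2 ++ [x])) (d, acc)).2
      = acc ++ scanD d l := by
  induction l with
  | nil => intro d acc; simp [scanD]
  | cons x xs ih =>
    intro d acc
    rw [List.foldl_cons]
    show (List.foldl _
        (if d.getD x 0 ≠ 0 then (d.insert x (d.getD x 0 - 1), acc) else (d, acc ++ [x])) xs).2
      = acc ++ scanD d (x :: xs)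
    by_cases hb : d.getD x 0 ≠ 0
    · rw [if_pos hb, ih, scanD, if_pos hb]
    · rw [if_neg hb, ih, scanD, if_neg hb]
      simp

-- B's counting loop
lemma cntB_getD (tokens : List String) (l : List String) :
    ∀ (d : PySem.Dict String Int) (t : String), t ∈ tokens →
      (l.foldl (fun c x => if PySem.Set.contains (PySem.Set.ofList tokens) x then c.insert x (c.getD x 0 + 1) else c) d).getD t 0
      = d.getD t 0 + (l.count t : Int) := by
  induction l with
  | nil => intro d t _; simp
  | cons x xs ih =>
    intro d t ht
    simp only [List.foldl_cons]
    by_cases hx : PySem.Set.contains (PySem.Set.ofList tokens) x = true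
    · simp only [hx, if_true]
      rw [ih _ t ht]
      by_cases htx : t = x
      · subst htx; simp [PySem.Dict.getD_insert_self, List.count_cons_self]; push_cast; ring
      · rw [PySem.Dict.getD_insert_of_ne _ _ _ htx, List.count_cons_of_ne (Ne.symm htx)]
    · rw [if_neg hx]
      rw [ih _ t ht]
      have htx : t ≠ x := by
        intro h; subst h
        apply hx
        simp only [PySem.Set.contains, List.contains_eq_mem, decide_eq_true_eq]
        exact (PySem.Set.mem_ofList tokens t).2 ht
      rw [List.count_cons_of_ne (Ne.symm htx)]

-- the main invariant proof for A's while-loop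
lemma loopA_eq (rule0 : List String) (repl : String) :
    ∀ (rest : List String) (fuel : Nat) (d : PySem.Dict String Int) (pre : List String) (k : Nat),
      d.keys.Nodup →
      (∀ p ∈ d.items, 0 ≤ p.2 ∧ p.2 ≤ (rest.count p.1 : Int)) →
      (∀ x ∈ pre, d.getD x 0 = 0) →
      rest.length + 2 * (d.values.sum).toNat + 1 ≤ fuel →
      swapLoopA rule0 repl fuel d (pre ++ rest ++ List.replicate k repl) (pre.length : Int)
        = pre ++ scanD d rest ++ List.replicate (k + remC rule0 d rest) repl := by
  intro rest
  induction rest with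
  | nil =>
    intro fuel d pre k hnd hinv hpre hfuel
    have hzero : ∀ v ∈ d.values, v = 0 := by
      intro v hv
      rcases List.mem_map.1 hv with ⟨p, hp, rfl⟩
      have := hinv p hp
      simp at this
      omega
    have hsum : d.values.sum = 0 := List.sum_eq_zero hzero
    obtain ⟨n, rfl⟩ : ∃ n, fuel = n + 1 := ⟨fuel - 1, by omega⟩
    simp [swapLoopA, hsum, scanD, remC]
  | cons x xs ih =>
    intro fuel d pre k hnd hinv hpre hfuel
    obtain ⟨n, rfl⟩ : ∃ n, fuel = n + 1 := ⟨fuel - 1, by omega⟩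
    have hnn : ∀ v ∈ d.values, 0 ≤ v := values_nonneg_of_items d (fun p hp => (hinv p hp).1)
    by_cases hsum : d.values.sum = 0
    · have hz : ∀ t, d.getD t 0 = 0 := getD_zero_of_sum_zero d hnn hsum
      simp [swapLoopA, hsum, scanD_of_zero d hz, remC_of_zero rule0 d hz, hz x]
    · have hget : PySem.List.pyGet? (pre ++ (x :: xs) ++ List.replicate k repl) (pre.length : Int)
          = some x := by
        rw [PySem.List.pyGet?_natCast]
        simp
      simp only [swapLoopA, hsum, ne_eq, not_false_eq_true, if_true, hget]
      by_cases hb : d.getD x 0 ≠ 0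
      · -- removal step
        have hgs : d.get? x = some (d.getD x 0) := get?_eq_some_getD d x hb
        have hmx : (x, d.getD x 0) ∈ d.items := PySem.Dict.mem_items_of_get?_eq_some d hgs
        have hbx := hinv _ hmx
        simp only [List.count_cons_self] at hbx
        have hb1 : 1 ≤ d.getD x 0 := by omega
        have herase : (pre ++ (x :: xs) ++ List.replicate k repl).eraseIdx ((pre.length : Int)).toNat
            = pre ++ (xs ++ List.replicate k repl) := by
          rw [Int.toNat_natCast]
          have : pre ++ (x :: xs) ++ List.replicate k repl
              = pre ++ x :: (xs ++ List.replicate k repl) := by simp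
          rw [this, eraseIdx_append_len]
        set d' := d.insert x (d.getD x 0 - 1) with hd'
        have hnd' : d'.keys.Nodup := PySem.Dict.nodup_keys_insert d _ _ hnd
        have hinv' : ∀ p ∈ d'.items, 0 ≤ p.2 ∧ p.2 ≤ (xs.count p.1 : Int) := by
          intro p hp
          rcases (PySem.Dict.mem_items_insert d _ _ p).1 hp with h | ⟨hp', hpx⟩
          · subst h
            constructor
            · simp; omega
            · simp only
              have := hbx.2
              push_cast at this ⊢
              omega
          · have := hinv p hp'
            rwa [List.count_cons_of_ne (Ne.symm hpx)] at this
        have hpre' : ∀ y ∈ pre, d'.getD y 0 = 0 := by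
          intro y hy
          have hyx : y ≠ x := by
            intro h; subst h; exact hb (hpre y hy)
          rw [hd', PySem.Dict.getD_insert_of_ne _ _ _ hyx]
          exact hpre y hy
        have hsum' : d'.values.sum = d.values.sum - 1 := by
          rw [hd', sum_values_insert d hnd hgs]
          ring
        have hsumpos : 1 ≤ d.values.sum := by
          have : d.getD x 0 ≤ d.values.sum :=
            List.single_le_sum hnn _ (List.mem_map.2 ⟨_, hmx, rfl⟩)
          omega
        have hfuel' : xs.length + 2 * (d'.values.sum).toNat + 1 ≤ n := by
          rw [hsum']
          simp only [List.length_cons] at hfuel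
          omega
        simp only [hb, if_true, herase]
        by_cases hcond : some x = PySem.List.pyGet? rule0 0
        · simp only [hcond, if_true]
          have hrepl : pre ++ (xs ++ List.replicate k repl) ++ [repl]
              = pre ++ xs ++ List.replicate (k + 1) repl := by
            simp [List.replicate_succ']
          rw [hrepl]
          have := ih n d' pre (k + 1) hnd' hinv' hpre' hfuel'
          rw [this]
          simp only [scanD, remC, ← hd']
          simp [hb, hcond]
          omega
        · simp only [hcond, if_false]
          have hassoc : pre ++ (xs ++ List.replicate k repl) = pre ++ xs ++ List.replicate k repl := by
            simp
          rw [hassoc]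
          have := ih n d' pre k hnd' hinv' hpre' hfuel'
          rw [this]
          simp only [scanD, remC, ← hd']
          simp [hb, hcond]
      · -- skip step
        push_neg at hb
        have hinv' : ∀ p ∈ d.items, 0 ≤ p.2 ∧ p.2 ≤ (xs.count p.1 : Int) := by
          intro p hp
          have h1 := hinv p hp
          by_cases hpx : p.1 = x
          · have : d.getD p.1 0 = p.2 := by
              obtain ⟨p1, p2⟩ := p
              exact PySem.Dict.getD_of_mem_items d hp hnd 0
            rw [hpx] at this
            rw [hb] at this
            constructor
            · omega
            · rw [← this]; positivity
          · rwa [List.count_cons_of_ne (Ne.symm hpx)] at h1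
        have hpre' : ∀ y ∈ pre ++ [x], d.getD y 0 = 0 := by
          intro y hy
          rcases List.mem_append.1 hy with h | h
          · exact hpre y h
          · simp at h; subst h; exact hb
        have hfuel' : xs.length + 2 * (d.values.sum).toNat + 1 ≤ n := by
          simp only [List.length_cons] at hfuel
          omega
        have hpath : pre ++ (x :: xs) ++ List.replicate k repl
            = (pre ++ [x]) ++ xs ++ List.replicate k repl := by simp
        have hcnt : ((pre.length : Int)) + 1 = ((pre ++ [x]).length : Int) := by
          simp
        simp only [hb, ne_eq, not_true_eq_false, if_false, hpath, hcnt]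
        rw [ih n d (pre ++ [x]) k hnd hinv' hpre' hfuel']
        simp [scanD, remC, hb]

-- extensional characterisation of both budget dictionaries
lemma getD_ofList_fun (g : String → Int) (tokens : List String) (t : String) :
    (PySem.Dict.ofList (tokens.map (fun x => (x, g x)))).getD t 0 = if t ∈ tokens then g t else 0 := by
  have : PySem.Dict.ofList (tokens.map (fun x => (x, g x)))
      = tokens.foldl (fun d x => d.insert x (g x)) PySem.Dict.empty := by
    simp [PySem.Dict.ofList, PySem.Dict.update, List.foldl_map]
  rw [this, getD_foldl_insert_fun]
  simp

lemma getD_budget (val : Int) (tokens : List String) (t : String) :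
    (tokens.foldl (fun d x => d.insert x val) PySem.Dict.empty).getD t 0 = if t ∈ tokens then val else 0 := by
  rw [getD_foldl_insert_fun (fun _ => val)]
  simp

lemma getD_overwrite (val : Int) (tokens : List String) (D0 : PySem.Dict String Int)
    (hD0 : ∀ t, t ∉ tokens → D0.getD t 0 = 0) (t : String) :
    (tokens.foldl (fun d x => d.insert x val) D0).getD t 0 = if t ∈ tokens then val else 0 := by
  rw [getD_foldl_insert_fun (fun _ => val)]
  by_cases ht : t ∈ tokens
  · simp [ht]
  · simp [ht, hD0 t ht]

lemma minL_props (path : List String) (t0 : String) (ts : List String) :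
    ∃ m : Int, PySem.List.min? ((t0 :: ts).map (fun t => (List.count t path : Int))) (fun v => v) = some m ∧
      0 ≤ m ∧ ∀ t ∈ t0 :: ts, m ≤ (List.count t path : Int) := by
  cases hm : PySem.List.min? ((t0 :: ts).map (fun t => (List.count t path : Int))) (fun v => v) with
  | none =>
    exfalso
    have := (PySem.List.min?_eq_none_iff _ _).1 hm
    simp at this
  | some m =>
    refine ⟨m, rfl, ?_, ?_⟩
    · have := PySem.List.min?_mem hm
      rcases List.mem_map.1 this with ⟨t, _, rfl⟩
      positivity
    · intro t ht
      exact PySem.List.min?_isMin hm _ (List.mem_map.2 ⟨t, ht, rfl⟩)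

theorem swap_moves_spec : Claim_equal_swap_moves := by
  intro path map_rule _hdom hpre
  obtain ⟨tokens, repl⟩ := map_rule
  have htok : tokens ≠ [] := hpre
  obtain ⟨t0, ts, rfl⟩ := List.exists_cons_of_ne_nil htok
  unfold Spec_swap_moves
  -- the common value list and its minimum
  obtain ⟨m, hm, hm0, hmle⟩ := minL_props path t0 ts
  -- A's value list equals the common one
  have hmapA : (t0 :: ts).map (fun x =>
      (PySem.Dict.ofList ((t0 :: ts).map (fun x => (x, (PySem.List.count path x : Int))))).getD x 0)
      = (t0 :: ts).map (fun t => (List.count t path : Int)) := by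
    apply List.map_congr_left
    intro t ht
    rw [getD_ofList_fun (fun x => (PySem.List.count path x : Int)) (t0 :: ts) t, if_pos ht,
      PySem.List.count_eq]
  -- B's value list equals the common one
  have hmapB : (t0 :: ts).map (fun t =>
      (path.foldl (fun c x => if PySem.Set.contains (PySem.Set.ofList (t0 :: ts)) x then
        c.insert x (c.getD x 0 + 1) else c) PySem.Dict.empty).getD t 0)
      = (t0 :: ts).map (fun t => (List.count t path : Int)) := by
    apply List.map_congr_left
    intro t ht
    rw [cntB_getD (t0 :: ts) path PySem.Dict.empty t ht, PySem.Dict.getD_empty]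
    ring
  -- the two budget dictionaries agree extensionally
  set D0 := PySem.Dict.ofList ((t0 :: ts).map (fun x => (x, (PySem.List.count path x : Int)))) with hD0
  set dA := (t0 :: ts).foldl (fun d x => d.insert x m) D0 with hdA
  set dB := (t0 :: ts).foldl (fun b t => b.insert t m) PySem.Dict.empty with hdB
  have hEA : ∀ t, dA.getD t 0 = if t ∈ t0 :: ts then m else 0 := by
    intro t
    rw [hdA]
    apply getD_overwrite
    intro u hu
    rw [hD0, getD_ofList_fun (fun x => (PySem.List.count path x : Int)) (t0 :: ts) u, if_neg hu]
  have hEB : ∀ t, dB.getD t 0 = if t ∈ t0 :: ts then m else 0 := fun t => getD_budget m (t0 :: ts) t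
  have hndA : dA.keys.Nodup := by
    rw [hdA]
    exact PySem.Dict.nodup_keys_foldl_insert (t0 :: ts) (fun _ _ => m) D0 (PySem.Dict.nodup_keys_ofList _)
  have hinvA : ∀ p ∈ dA.items, 0 ≤ p.2 ∧ p.2 ≤ (path.count p.1 : Int) := by
    intro p hp
    obtain ⟨a, b⟩ := p
    have hval : dA.getD a 0 = b := PySem.Dict.getD_of_mem_items dA hp hndA 0
    rw [hEA a] at hval
    by_cases ha : a ∈ t0 :: ts
    · rw [if_pos ha] at hval
      subst hval
      exact ⟨hm0, hmle a ha⟩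
    · rw [if_neg ha] at hval
      subst hval
      exact ⟨le_refl 0, by positivity⟩
  -- evaluate A via the loop invariant
  have hA := loopA_eq (t0 :: ts) repl path (path.length + 2 * (dA.values.sum).toNat + 1) dA [] 0
    hndA hinvA (by intro x hx; simp at hx) (le_refl _)
  simp only [List.nil_append, List.replicate_zero, List.append_nil, List.length_nil,
    Int.natCast_zero, Nat.zero_add, Nat.add_zero, List.replicate] at hA
  -- evaluate B via the fold lemma
  have hB := foldl_scan path dB []
  -- remC of the B-budget
  have hrem : remC (t0 :: ts) dB path = m.toNat := by
    have := remC_eq_budget t0 ts path dB (by rw [hEB]; simp [hm0]) (by rw [hEB]; simpa using hmle t0 (by simp))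
    rwa [hEB t0, if_pos (by simp)] at this
  -- assemble
  show swap_moves path (t0 :: ts, repl) = swap_moves_alt path (t0 :: ts, repl)
  simp only [swap_moves, swap_moves_alt, ← hD0]
  rw [hmapA, hmapB, hm]
  simp only [Option.getD_some, ← hdA, ← hdB]
  rw [hA, hB]
  rw [scanD_congr path dA dB (fun t => by rw [hEA, hEB]),
    remC_congr (t0 :: ts) path dA dB (fun t => by rw [hEA, hEB]), hrem]
  simp
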